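-- pv_equiv track=rewrite | github.com/qibinc/leetcode | interviews/hrt/2.py | calc_consonant_vowel
-- ===== SOURCE A (Python) =====
-- vowels = set(["a", "e", "i", "o", "u"])
--
-- def calc_consonant_vowel(s, i, j):
--     if i == j:
--         return 0, 0
--     elif i + 1 == j:
--         return 1, int(s[i] in vowels)
--     left, left_vow = calc_consonant_vowel(s, i, (i + j) // 2)
--     right, right_vow = calc_consonant_vowel(s, (i + j) // 2, j)
--     ret = abs(left_vow + right_vow - (j - i - left_vow - right_vow)) + left + right, left_vow + right_vow
--     return ret
-- ===== SOURCE B (Python) =====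
-- def calc_consonant_vowel(s, i, j):
--     if i == j:
--         return 0, 0
--     if not (0 <= i < j <= len(s)):
--         raise IndexError("interval out of range")
--     P = [0]
--     acc = 0
--     for c in s:
--         acc += c in "aeiou"
--         P.append(acc)
--     total = 0
--     stack = [(i, j)]
--     while stack:
--         lo, hi = stack.pop()
--         if hi - lo == 1:
--             total += 1
--         else:
--             total += abs(2 * (P[hi] - P[lo]) - (hi - lo))
--             mid = (lo + hi) // 2
--             stack.append((mid, hi))
--             stack.append((lo, mid))
--     return total, P[j] - P[i]
-- ===== Notes on version B (the rewrite author's own statement) =====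
-- stated objective: alternative
-- what changed: Replaces the tuple-returning recursion with a vowel prefix-sum array plus an explicit stack that enumerates the same segment-tree intervals iteratively, reading each interval's vowel count in O(1) from the prefix array.
-- outside the precondition, e.g. on calc_consonant_vowel('ae', -2, 1): A returns (8, 3), B raises IndexError
import Mathlib
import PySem

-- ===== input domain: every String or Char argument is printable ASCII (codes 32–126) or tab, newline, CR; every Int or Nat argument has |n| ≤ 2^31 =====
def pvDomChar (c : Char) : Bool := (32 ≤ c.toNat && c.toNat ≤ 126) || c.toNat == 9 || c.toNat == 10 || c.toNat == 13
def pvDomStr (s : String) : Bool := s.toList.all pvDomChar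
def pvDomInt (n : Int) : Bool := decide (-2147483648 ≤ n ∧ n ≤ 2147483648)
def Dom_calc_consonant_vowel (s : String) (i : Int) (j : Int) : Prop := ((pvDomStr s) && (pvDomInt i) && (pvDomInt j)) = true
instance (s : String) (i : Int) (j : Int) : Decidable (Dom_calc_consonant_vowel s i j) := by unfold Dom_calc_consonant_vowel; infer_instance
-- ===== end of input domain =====

-- B replaces A's tuple-returning recursion by a vowel prefix-sum array plus an explicit
-- stack over the same segment-tree intervals (objective: alternative decomposition).

-- ===== PORT A =====
def pvVowels : List Char := ['a', 'e', 'i', 'o', 'u']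

-- Fuel-indexed transliteration of A's recursion.  Python's recursion does not terminate
-- for i > j (RecursionError) — those inputs are outside Pre_; inside Pre_ the fuel
-- (j-i).toNat + 1 supplied below is always sufficient, so the 0-fuel row is never reached.
def pvCalcA (s : List Char) : Nat → Int → Int → Int × Int
  | 0, _, _ => (0, 0)
  | f + 1, i, j =>
    if i = j then (0, 0)
    else if i + 1 = j then
      (1, match PySem.List.pyGet? s i with
          | some c => if c ∈ pvVowels then 1 else 0
          | none => 0)   -- none = IndexError in Python (outside Pre_)
    else
      let m := PySem.Int.floordiv (i + j) 2
      let l := pvCalcA s f i m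
      let r := pvCalcA s f m j
      (|l.2 + r.2 - (j - i - l.2 - r.2)| + l.1 + r.1, l.2 + r.2)

def calc_consonant_vowel (s : String) (i : Int) (j : Int) : Int × Int :=
  pvCalcA s.toList ((j - i).toNat + 1) i j

-- ===== PORT B =====
-- prefix-sum loop: P = [0]; acc = 0; for c in s: acc += c in "aeiou"; P.append(acc)
def pvPrefixStep (st : List Int × Int) (c : Char) : List Int × Int :=
  (st.1 ++ [st.2 + (if c ∈ pvVowels then 1 else 0)], st.2 + (if c ∈ pvVowels then 1 else 0))

-- the while-stack loop of B; fuel 2*(j-i).toNat is always sufficient inside Pre_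
def pvLoopB (P : List Int) : Nat → List (Int × Int) → Int → Int
  | 0, _, total => total
  | f + 1, stack, total =>
    match stack with
    | [] => total
    | (lo, hi) :: rest =>
      if hi - lo = 1 then pvLoopB P f rest (total + 1)
      else
        let mid := PySem.Int.floordiv (lo + hi) 2
        pvLoopB P f ((lo, mid) :: (mid, hi) :: rest)
          (total + |2 * (PySem.List.pyGetD P hi 0 - PySem.List.pyGetD P lo 0) - (hi - lo)|)

def calc_consonant_vowel_alt (s : String) (i : Int) (j : Int) : Int × Int :=
  if i = j then (0, 0)
  else if ¬ (0 ≤ i ∧ i < j ∧ j ≤ (s.toList.length : Int)) then (0, 0)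
    -- Python B raises IndexError on this branch; it lies outside Pre_
  else
    let P := (s.toList.foldl pvPrefixStep ([0], 0)).1
    (pvLoopB P (2 * (j - i).toNat) [(i, j)] 0,
     PySem.List.pyGetD P j 0 - PySem.List.pyGetD P i 0)

-- ===== PRECONDITION & SPEC =====
-- Pre_ admits i == j (A returns (0,0) for any i) and proper in-bounds intervals
-- 0 ≤ i < j ≤ len(s).  It excludes the remaining inputs, on which A either raises
-- (IndexError when a leaf index is out of range, RecursionError when i > j) or
-- returns a value only via Python's negative-index wraparound (e.g. s="ae", i=-2,
-- j=1), a defensible corner on which B's bounds validation raises IndexError.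
def Pre_calc_consonant_vowel (s : String) (i : Int) (j : Int) : Prop :=
  i = j ∨ (0 ≤ i ∧ i < j ∧ j ≤ (s.toList.length : Int))
instance (s : String) (i : Int) (j : Int) : Decidable (Pre_calc_consonant_vowel s i j) := by
  unfold Pre_calc_consonant_vowel; infer_instance

def pvWitness_calc_consonant_vowel : String × Int × Int := ("ab", 0, 2)

def Spec_calc_consonant_vowel (s : String) (i : Int) (j : Int) (out : Int × Int) : Prop := out = calc_consonant_vowel_alt s i j
instance (s : String) (i : Int) (j : Int) (out : Int × Int) : Decidable (Spec_calc_consonant_vowel s i j out) := by unfold Spec_calc_consonant_vowel; infer_instance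

-- ===== CLAIM (what is proved, stated in full; the proofs are below) =====
def Claim_equal_calc_consonant_vowel : Prop := ∀ (s : String) (i : Int) (j : Int), Dom_calc_consonant_vowel s i j → Pre_calc_consonant_vowel s i j → Spec_calc_consonant_vowel s i j (calc_consonant_vowel s i j)

-- ===== LEMMAS AND PROOFS =====

-- vowel count of the index interval [a, b) of s
def pvVC (s : List Char) (a b : Nat) : Int :=
  (((s.drop a).take (b - a)).countP (fun c => c ∈ pvVowels) : Int)

theorem pvVC_self (s : List Char) (a : Nat) : pvVC s a a = 0 := by
  simp [pvVC]

theorem pvVC_add (s : List Char) (a b c : Nat) (hab : a ≤ b) (hbc : b ≤ c) :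
    pvVC s a b + pvVC s b c = pvVC s a c := by
  unfold pvVC
  have h1 : c - a = (b - a) + (c - b) := by omega
  rw [h1, List.take_add, List.countP_append]
  have h2 : (s.drop a).drop (b - a) = s.drop b := by
    rw [List.drop_drop]; congr 1; omega
  rw [h2]; push_cast; ring

theorem pvVC_leaf (s : List Char) (a : Nat) (h : a < s.length) :
    pvVC s a (a + 1) = if s[a] ∈ pvVowels then 1 else 0 := by
  unfold pvVC
  have h1 : a + 1 - a = 1 := by omega
  rw [h1, List.drop_eq_getElem_cons h, List.take_succ_cons, List.take_zero]
  simp only [List.countP_cons, List.countP_nil]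
  by_cases hv : s[a] ∈ pvVowels
  · simp [hv]
  · simp [hv]


-- one-step unfolding of A's recursion at positive fuel
theorem pvCalcA_succ (s : List Char) (f : Nat) (i j : Int) :
    pvCalcA s (f + 1) i j
      = (if i = j then (0, 0)
         else if i + 1 = j then
           (1, match PySem.List.pyGet? s i with
               | some c => if c ∈ pvVowels then 1 else 0
               | none => 0)
         else
           (|(pvCalcA s f i (PySem.Int.floordiv (i + j) 2)).2
               + (pvCalcA s f (PySem.Int.floordiv (i + j) 2) j).2
               - (j - i - (pvCalcA s f i (PySem.Int.floordiv (i + j) 2)).2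
                   - (pvCalcA s f (PySem.Int.floordiv (i + j) 2) j).2)|
             + (pvCalcA s f i (PySem.Int.floordiv (i + j) 2)).1
             + (pvCalcA s f (PySem.Int.floordiv (i + j) 2) j).1,
            (pvCalcA s f i (PySem.Int.floordiv (i + j) 2)).2
              + (pvCalcA s f (PySem.Int.floordiv (i + j) 2) j).2)) := rfl

-- A's fuel is irrelevant once it exceeds the interval length
theorem pvCalcA_fuel (s : List Char) :
    ∀ (f g : Nat) (i j : Int), 0 ≤ i → i ≤ j → (j - i).toNat < f → (j - i).toNat < g →
      pvCalcA s f i j = pvCalcA s g i j := by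
  intro f
  induction f with
  | zero => intro g i j _ _ hf _; omega
  | succ f ih =>
    intro g i j hi hij hf hg
    match g, hg with
    | g + 1, _ =>
      by_cases heq : i = j
      · simp [pvCalcA, heq]
      · by_cases hleaf : i + 1 = j
        · simp [pvCalcA, heq, hleaf]
        · have hm : PySem.Int.floordiv (i + j) 2 = (i + j) / 2 :=
            PySem.Int.floordiv_eq_ediv_of_pos (by omega)
          simp only [pvCalcA, if_neg heq, if_neg hleaf]
          rw [ih g i (PySem.Int.floordiv (i + j) 2) hi (by rw [hm]; omega)
                (by rw [hm]; omega) (by rw [hm]; omega),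
              ih g (PySem.Int.floordiv (i + j) 2) j (by rw [hm]; omega) (by rw [hm]; omega)
                (by rw [hm]; omega) (by rw [hm]; omega)]

-- the second component of A's result is the vowel count of [i, j)
theorem pvCalcA_snd (s : List Char) :
    ∀ (f : Nat) (i j : Int), 0 ≤ i → i ≤ j → j ≤ (s.length : Int) → (j - i).toNat < f →
      (pvCalcA s f i j).2 = pvVC s i.toNat j.toNat := by
  intro f
  induction f with
  | zero => intro i j _ _ _ hf; omega
  | succ f ih =>
    intro i j hi hij hj hf
    by_cases heq : i = j
    · simp [pvCalcA, heq, pvVC_self]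
    · by_cases hleaf : i + 1 = j
      · have hlt : i.toNat < s.length := by omega
        have hget : PySem.List.pyGet? s i = some s[i.toNat] :=
          PySem.List.pyGet?_eq_some_getElem s hi (by omega)
        have hjn : j.toNat = i.toNat + 1 := by omega
        simp [pvCalcA, if_neg heq, hleaf, hget, hjn, pvVC_leaf s i.toNat hlt]
      · have hm : PySem.Int.floordiv (i + j) 2 = (i + j) / 2 :=
          PySem.Int.floordiv_eq_ediv_of_pos (by omega)
        simp only [pvCalcA, if_neg heq, if_neg hleaf]
        rw [ih i (PySem.Int.floordiv (i + j) 2) hi (by rw [hm]; omega) (by rw [hm]; omega)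
              (by rw [hm]; omega),
            ih (PySem.Int.floordiv (i + j) 2) j (by rw [hm]; omega) (by rw [hm]; omega) hj
              (by rw [hm]; omega)]
        rw [pvVC_add s i.toNat (PySem.Int.floordiv (i + j) 2).toNat j.toNat
              (by rw [hm] at *; omega) (by rw [hm] at *; omega)]

-- A's total at a leaf
theorem pvCalcA_fst_leaf (s : List Char) (i j : Int) (h : i + 1 = j) :
    (pvCalcA s ((j - i).toNat + 1) i j).1 = 1 := by
  have h2 : i ≠ j := by omega
  simp [pvCalcA, ← h]

-- A's total at an internal node splits at the midpoint
theorem pvCalcA_fst_split (s : List Char) (i j : Int) (hi : 0 ≤ i) (hij : i + 2 ≤ j)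
    (hj : j ≤ (s.length : Int)) :
    (pvCalcA s ((j - i).toNat + 1) i j).1
      = |2 * pvVC s i.toNat j.toNat - (j - i)|
        + (pvCalcA s (((PySem.Int.floordiv (i + j) 2) - i).toNat + 1) i (PySem.Int.floordiv (i + j) 2)).1
        + (pvCalcA s ((j - (PySem.Int.floordiv (i + j) 2)).toNat + 1) (PySem.Int.floordiv (i + j) 2) j).1 := by
  have hm : PySem.Int.floordiv (i + j) 2 = (i + j) / 2 :=
    PySem.Int.floordiv_eq_ediv_of_pos (by omega)
  have hm1 : i < PySem.Int.floordiv (i + j) 2 := by rw [hm]; omega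
  have hm2 : PySem.Int.floordiv (i + j) 2 < j := by rw [hm]; omega
  have heq : i ≠ j := by omega
  have hleaf : ¬ (i + 1 = j) := by omega
  obtain ⟨L, hL⟩ : ∃ L, (j - i).toNat = L + 2 := ⟨(j - i).toNat - 2, by omega⟩
  rw [hL]
  rw [pvCalcA_succ s (L + 2) i j, if_neg heq, if_neg hleaf]
  rw [pvCalcA_fuel s (L + 2) ((PySem.Int.floordiv (i + j) 2 - i).toNat + 1) i
        (PySem.Int.floordiv (i + j) 2) hi (by omega) (by omega) (by omega),
      pvCalcA_fuel s (L + 2) ((j - PySem.Int.floordiv (i + j) 2).toNat + 1)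
        (PySem.Int.floordiv (i + j) 2) j (by omega) (by omega) (by omega) (by omega)]
  rw [pvCalcA_snd s ((PySem.Int.floordiv (i + j) 2 - i).toNat + 1) i
        (PySem.Int.floordiv (i + j) 2) hi (by omega) (by omega) (by omega),
      pvCalcA_snd s ((j - PySem.Int.floordiv (i + j) 2).toNat + 1)
        (PySem.Int.floordiv (i + j) 2) j (by omega) (by omega) hj (by omega)]
  rw [← pvVC_add s i.toNat (PySem.Int.floordiv (i + j) 2).toNat j.toNat (by omega) (by omega)]
  have hre : pvVC s i.toNat (PySem.Int.floordiv (i + j) 2).toNat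
        + pvVC s (PySem.Int.floordiv (i + j) 2).toNat j.toNat
      - (j - i - pvVC s i.toNat (PySem.Int.floordiv (i + j) 2).toNat
          - pvVC s (PySem.Int.floordiv (i + j) 2).toNat j.toNat)
      = 2 * (pvVC s i.toNat (PySem.Int.floordiv (i + j) 2).toNat
          + pvVC s (PySem.Int.floordiv (i + j) 2).toNat j.toNat) - (j - i) := by ring
  rw [hre]

-- running-sum characterization of the prefix loop
def pvCumul : List Char → Int → List Int
  | [], _ => []
  | c :: cs, a => (a + (if c ∈ pvVowels then 1 else 0)) :: pvCumul cs (a + (if c ∈ pvVowels then 1 else 0))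

theorem pvPrefix_foldl (s : List Char) :
    ∀ (P0 : List Int) (a0 : Int),
      s.foldl pvPrefixStep (P0, a0)
        = (P0 ++ pvCumul s a0, a0 + (s.countP (fun c => c ∈ pvVowels) : Int)) := by
  induction s with
  | nil => intro P0 a0; simp [pvCumul]
  | cons c cs ih =>
    intro P0 a0
    simp only [List.foldl_cons, pvPrefixStep, ih, pvCumul, List.countP_cons, Prod.mk.injEq]
    refine ⟨by simp, ?_⟩
    by_cases hv : c ∈ pvVowels
    · simp [hv]; ring
    · simp [hv]

theorem pvCumul_getD (s : List Char) :
    ∀ (k : Nat) (a : Int), k < s.length →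
      (pvCumul s a).getD k 0 = a + pvVC s 0 (k + 1) := by
  induction s with
  | nil => intro k a h; simp at h
  | cons c cs ih =>
    intro k a h
    match k with
    | 0 =>
      by_cases hv : c ∈ pvVowels <;>
        simp [pvCumul, pvVC, List.take_succ_cons, hv]
    | k + 1 =>
      simp only [pvCumul, List.getD_cons_succ]
      rw [ih k _ (by simpa using h)]
      have : pvVC (c :: cs) 0 (k + 2) = (if c ∈ pvVowels then 1 else 0) + pvVC cs 0 (k + 1) := by
        simp [pvVC, List.take_succ_cons, List.countP_cons]
        split_ifs <;> ring
      rw [this]; ring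

theorem pvP_getD (s : List Char) (k : Nat) (h : k ≤ s.length) :
    ((0 : Int) :: pvCumul s 0).getD k 0 = pvVC s 0 k := by
  match k with
  | 0 => simp [pvVC_self]
  | k + 1 =>
    simp only [List.getD_cons_succ]
    rw [pvCumul_getD s k 0 (by omega)]
    ring

theorem pvP_length (s : List Char) : ∀ (a : Int), (pvCumul s a).length = s.length := by
  induction s with
  | nil => intro a; simp [pvCumul]
  | cons c cs ih => intro a; simp [pvCumul, ih]

-- pyGetD on the prefix list, for 0 ≤ k ≤ len s
theorem pvP_pyGetD (s : List Char) (k : Int) (h0 : 0 ≤ k) (h1 : k ≤ (s.length : Int)) :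
    PySem.List.pyGetD ((0 : Int) :: pvCumul s 0) k 0 = pvVC s 0 k.toNat := by
  have hlen : ((0 : Int) :: pvCumul s 0).length = s.length + 1 := by simp [pvP_length]
  rw [PySem.List.pyGetD_eq_getElem _ 0 h0 (by rw [hlen]; push_cast; omega)]
  rw [← pvP_getD s k.toNat (by omega)]
  rw [List.getD_eq_getElem _ _ (by rw [hlen]; omega)]

-- invariant of B's stack loop: it adds A's total for every interval on the stack
theorem pvLoopB_inv (s : List Char) :
    ∀ (f : Nat) (stack : List (Int × Int)) (total : Int),
      (∀ p ∈ stack, 0 ≤ p.1 ∧ p.1 < p.2 ∧ p.2 ≤ (s.length : Int)) →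
      (stack.map (fun p => 2 * (p.2 - p.1).toNat - 1)).sum ≤ f →
      pvLoopB ((0 : Int) :: pvCumul s 0) f stack total
        = total + (stack.map (fun p => (pvCalcA s ((p.2 - p.1).toNat + 1) p.1 p.2).1)).sum := by
  intro f
  induction f with
  | zero =>
    intro stack total hok hf
    match stack with
    | [] => simp [pvLoopB]
    | (lo, hi) :: rest =>
      exfalso
      have h1 := hok (lo, hi) (by simp)
      simp only [List.map_cons, List.sum_cons] at hf
      omega
  | succ f ih =>
    intro stack total hok hf
    match stack with
    | [] => simp [pvLoopB]
    | (lo, hi) :: rest =>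
      have hb := hok (lo, hi) (by simp)
      simp only at hb
      by_cases hleaf : hi - lo = 1
      · have h1 : (pvCalcA s ((hi - lo).toNat + 1) lo hi).1 = 1 :=
          pvCalcA_fst_leaf s lo hi (by omega)
        simp only [pvLoopB, if_pos hleaf]
        rw [ih rest (total + 1) (fun p hp => hok p (by simp [hp]))
              (by simp only [List.map_cons, List.sum_cons] at hf; omega)]
        simp [h1]; ring
      · have h2 : lo + 2 ≤ hi := by omega
        have hm : PySem.Int.floordiv (lo + hi) 2 = (lo + hi) / 2 :=
          PySem.Int.floordiv_eq_ediv_of_pos (by omega)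
        have hm1 : lo < PySem.Int.floordiv (lo + hi) 2 := by rw [hm]; omega
        have hm2 : PySem.Int.floordiv (lo + hi) 2 < hi := by rw [hm]; omega
        simp only [pvLoopB, if_neg hleaf]
        rw [ih ((lo, PySem.Int.floordiv (lo + hi) 2) :: (PySem.Int.floordiv (lo + hi) 2, hi) :: rest) _
              (by intro p hp
                  simp only [List.mem_cons] at hp
                  rcases hp with h | h | h
                  · subst h; exact ⟨by omega, by omega, by omega⟩
                  · subst h; exact ⟨by omega, by omega, by omega⟩
                  · exact hok p (by simp [h]))
              (by simp only [List.map_cons, List.sum_cons] at hf ⊢; omega)]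
        simp only [List.map_cons, List.sum_cons]
        rw [pvP_pyGetD s hi (by omega) (by omega), pvP_pyGetD s lo (by omega) (by omega)]
        have hvc : pvVC s 0 hi.toNat - pvVC s 0 lo.toNat = pvVC s lo.toNat hi.toNat := by
          rw [← pvVC_add s 0 lo.toNat hi.toNat (by omega) (by omega)]; ring
        rw [hvc]
        rw [pvCalcA_fst_split s lo hi (by omega) h2 (by omega)]
        ring

-- ===== VERDICT (by name: the statement is the Claim_ definition above) =====
theorem calc_consonant_vowel_spec : Claim_equal_calc_consonant_vowel := by
  intro s i j _ hpre
  unfold Spec_calc_consonant_vowel calc_consonant_vowel calc_consonant_vowel_alt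
  rcases hpre with heq | ⟨hi, hij, hj⟩
  · subst heq
    simp [pvCalcA]
  · have hne : ¬ (i = j) := by omega
    rw [if_neg hne, if_neg (not_not_intro ⟨hi, hij, hj⟩)]
    have hP : (s.toList.foldl pvPrefixStep ([0], 0)).1 = (0 : Int) :: pvCumul s.toList 0 := by
      rw [pvPrefix_foldl]; simp
    rw [hP]
    show pvCalcA s.toList ((j - i).toNat + 1) i j
      = (pvLoopB ((0 : Int) :: pvCumul s.toList 0) (2 * (j - i).toNat) [(i, j)] 0,
         PySem.List.pyGetD ((0 : Int) :: pvCumul s.toList 0) j 0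
           - PySem.List.pyGetD ((0 : Int) :: pvCumul s.toList 0) i 0)
    have hA := pvCalcA_snd s.toList ((j - i).toNat + 1) i j (by omega) (by omega) hj (by omega)
    have hloop := pvLoopB_inv s.toList (2 * (j - i).toNat) [(i, j)] 0
      (by intro p hp; simp at hp; subst hp; exact ⟨hi, hij, hj⟩)
      (by simp only [List.map_cons, List.map_nil, List.sum_cons, List.sum_nil]; omega)
    simp only [List.map_cons, List.map_nil, List.sum_cons, List.sum_nil] at hloop
    rw [hloop]
    rw [pvP_pyGetD s.toList j (by omega) hj, pvP_pyGetD s.toList i (by omega) (by omega)]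
    have hvc : pvVC s.toList 0 j.toNat - pvVC s.toList 0 i.toNat = pvVC s.toList i.toNat j.toNat := by
      rw [← pvVC_add s.toList 0 i.toNat j.toNat (by omega) (by omega)]; ring
    rw [hvc]
    refine Prod.ext ?_ ?_
    · simp
    · simp [hA]
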